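-- pv_equiv track=rewrite | github.com/Marius1607/Daily-Coding-Problems | anagrams in words/anagramsInWord.py | search
-- ===== SOURCE A (Python) =====
-- def search(text, subtext):
--     ltr = []
--     for i in range(len(text)):
--         if text[i] == subtext[0]:
--             k = 0
--             check = True
--             for j in range(i, i + len(subtext)):
--                 try:
--                     if subtext[k] != text[j]:
--                         check = False
--                     k = k + 1
--                 except:
--                     check = False
--             ltr.append(i) if check else None
--         if text[i] == subtext[len(subtext) - 1]:
--             k = len(subtext) - 1
--             check = True
--             for j in range(i, i + len(subtext)):
--                 try:
--                     if subtext[k] != text[j]: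
--                         check = False
--                     k = k - 1
--                 except:
--                     check = False
--             ltr.append(i) if check else None
--     return ltr
-- ===== SOURCE B (Python) =====
-- def search(text, subtext):
--     def occurrences(pat):
--         out = []
--         j = text.find(pat)
--         while j != -1:
--             out.append(j)
--             j = text.find(pat, j + 1)
--         return out
--
--     fwd = occurrences(subtext)
--     bwd = occurrences(subtext[::-1])
--     res = []
--     a = b = 0
--     while a < len(fwd) and b < len(bwd):
--         if fwd[a] <= bwd[b]:
--             res.append(fwd[a])
--             a += 1
--         else:
--             res.append(bwd[b])
--             b += 1
--     res.extend(fwd[a:])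
--     res.extend(bwd[b:])
--     return res
-- ===== Notes on version B (the rewrite author's own statement) =====
-- stated objective: faster
-- what changed: A scans every index and re-compares subtext character by character in two interpreted inner loops; B collects the occurrence lists of subtext and of its reversed subtext with repeated str.find calls and merges the two sorted index lists two-pointer style (forward occurrence first on ties).
-- outside the precondition, e.g. on search('', ''): A returns [], B returns [0, 0]
import Mathlib
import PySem

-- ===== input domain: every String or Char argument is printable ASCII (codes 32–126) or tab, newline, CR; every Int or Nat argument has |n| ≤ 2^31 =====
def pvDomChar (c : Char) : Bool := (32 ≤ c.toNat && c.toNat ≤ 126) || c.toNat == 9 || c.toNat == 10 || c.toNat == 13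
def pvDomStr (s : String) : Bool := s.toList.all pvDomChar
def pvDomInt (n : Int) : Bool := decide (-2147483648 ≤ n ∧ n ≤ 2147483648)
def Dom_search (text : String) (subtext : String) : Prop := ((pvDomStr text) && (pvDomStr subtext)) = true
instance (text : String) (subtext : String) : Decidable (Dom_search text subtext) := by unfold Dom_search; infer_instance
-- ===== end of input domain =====

-- B replaces A's per-index char-by-char double scan by two find-based occurrence scans
-- (subtext and its reverse) merged two-pointer style; objective: faster by constant factor in Python.

-- ===== PORT A =====
-- one iteration of A's inner 'for j' loop: state = (k, check); any failing index access
-- is caught by A's bare 'except' and sets check = False without advancing k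
def searchStep (s t : List Char) (delta : Int) (st : Int × Bool) (j : Int) : Int × Bool :=
  match PySem.List.pyGet? s st.1, PySem.List.pyGet? t j with
  | some sk, some tj => (st.1 + delta, if sk = tj then st.2 else false)
  | _, _ => (st.1, false)

-- 'text[i] == subtext[0]' / 'subtext[len-1]': exact for nonempty subtext (Pre_) since i < len(text)
def search (text : String) (subtext : String) : List Int :=
  let t := text.toList
  let s := subtext.toList
  let m : Int := (s.length : Int)
  (List.range t.length).foldl (fun ltr i =>
    let ltr :=
      if t.getD i ' ' = s.headD ' ' then
        if ((PySem.List.pyRange (i : Int) ((i : Int) + m) 1).foldl (searchStep s t 1) (0, true)).2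
        then ltr ++ [(i : Int)] else ltr
      else ltr
    if t.getD i ' ' = s.getLastD ' ' then
      if ((PySem.List.pyRange (i : Int) ((i : Int) + m) 1).foldl (searchStep s t (-1)) (m - 1, true)).2
      then ltr ++ [(i : Int)] else ltr
    else ltr) []

-- ===== PORT B =====
-- text.find(pat, start): smallest j >= start with a match, scanning j upward (none = -1);
-- fuel is a totality device, t.length + 1 - start steps always suffice
def findFromGo (t p : List Char) : Nat → Nat → Option Nat
  | 0, _ => none
  | fuel + 1, st =>
    if st ≤ t.length then
      if p.isPrefixOf (t.drop st) then some st
      else findFromGo t p fuel (st + 1)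
    else none

def findFrom (t p : List Char) (start : Nat) : Option Nat :=
  findFromGo t p (t.length + 1 - start) start

-- B's 'while j != -1' occurrence loop (fuel as above)
def occGo (t p : List Char) : Nat → Nat → List Int
  | 0, _ => []
  | fuel + 1, st =>
    match findFrom t p st with
    | none => []
    | some j => (j : Int) :: occGo t p fuel (j + 1)

def occAux (t p : List Char) (start : Nat) : List Int :=
  occGo t p (t.length + 1 - start) start

-- B's two-pointer merge loop (fuel = combined length, consumed one element per step)
def mergeGo : Nat → List Int → List Int → List Int
  | 0, xs, ys => xs ++ ys
  | fuel + 1, xs, ys =>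
    match xs, ys with
    | [], ys => ys
    | x :: xs, [] => x :: xs
    | x :: xs, y :: ys =>
      if x ≤ y then x :: mergeGo fuel xs (y :: ys) else y :: mergeGo fuel (x :: xs) ys

def mergeInt (xs ys : List Int) : List Int := mergeGo (xs.length + ys.length) xs ys

def search_alt (text : String) (subtext : String) : List Int :=
  let t := text.toList
  let s := subtext.toList
  mergeInt (occAux t s 0) (occAux t s.reverse 0)

-- ===== PRECONDITION & SPEC =====
-- Pre_ excludes empty subtext: A raises IndexError there whenever text is nonempty, and on
-- the single remaining input ("", "") A's [] vs B's [0, 0] are both accidental corner values.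
def Pre_search (text : String) (subtext : String) : Prop := subtext.toList ≠ []
instance (text : String) (subtext : String) : Decidable (Pre_search text subtext) := by
  unfold Pre_search; infer_instance
def pvWitness_search : String × String := ("abaab", "ab")

def Spec_search (text : String) (subtext : String) (out : List Int) : Prop := out = search_alt text subtext
instance (text : String) (subtext : String) (out : List Int) : Decidable (Spec_search text subtext out) := by unfold Spec_search; infer_instance

-- ===== CLAIM (what is proved, stated in full; the proofs are below) =====
def Claim_equal_search : Prop := ∀ (text : String) (subtext : String), Dom_search text subtext → Pre_search text subtext → Spec_search text subtext (search text subtext)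

-- ===== LEMMAS AND PROOFS =====

-- the per-index contribution both programs produce
def hits (t s : List Char) (i : Nat) : List Int :=
  (if s.isPrefixOf (t.drop i) then [(i : Int)] else []) ++
  (if s.reverse.isPrefixOf (t.drop i) then [(i : Int)] else [])

-- once check is false it stays false
theorem foldl_searchStep_false (s t : List Char) (delta : Int) (l : List Int) :
    ∀ k : Int, (l.foldl (searchStep s t delta) (k, false)).2 = false := by
  induction l with
  | nil => intro k; rfl
  | cons j l ih =>
    intro k
    simp only [List.foldl_cons, searchStep]
    cases hs : PySem.List.pyGet? s k <;> cases ht : PySem.List.pyGet? t j <;> simp [ih]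

-- forward okF / backward okB: what the inner loop checks, index by index
def okF (s t : List Char) : Int → Int → Nat → Bool
  | _, _, 0 => true
  | k, j, r + 1 =>
    match PySem.List.pyGet? s k, PySem.List.pyGet? t j with
    | some a, some b => (a = b) && okF s t (k + 1) (j + 1) r
    | _, _ => false

def okB (s t : List Char) : Int → Int → Nat → Bool
  | _, _, 0 => true
  | k, j, r + 1 =>
    match PySem.List.pyGet? s k, PySem.List.pyGet? t j with
    | some a, some b => (a = b) && okB s t (k - 1) (j + 1) r
    | _, _ => false

theorem foldl_searchStep_eq_okF (s t : List Char) (r : Nat) :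
    ∀ (k j : Int),
      ((PySem.List.pyRange j (j + r) 1).foldl (searchStep s t 1) (k, true)).2 = okF s t k j r := by
  induction r with
  | zero => intro k j; simp [PySem.List.pyRange_one, okF]
  | succ r ih =>
    intro k j
    rw [PySem.List.pyRange_one_cons (by omega)]
    simp only [List.foldl_cons, searchStep, okF]
    cases hs : PySem.List.pyGet? s k <;> cases ht : PySem.List.pyGet? t j
    · simp [foldl_searchStep_false]
    · simp [foldl_searchStep_false]
    · simp [foldl_searchStep_false]
    · rename_i a b
      have hr : j + ((r + 1 : Nat) : Int) = (j + 1) + (r : Int) := by push_cast; ring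
      rw [hr]
      by_cases hab : a = b
      · subst hab
        simp only [if_pos rfl, decide_true, Bool.true_and]
        exact ih (k + 1) (j + 1)
      · simp [hab, foldl_searchStep_false]

theorem foldl_searchStep_eq_okB (s t : List Char) (r : Nat) :
    ∀ (k j : Int),
      ((PySem.List.pyRange j (j + r) 1).foldl (searchStep s t (-1)) (k, true)).2 = okB s t k j r := by
  induction r with
  | zero => intro k j; simp [okB]
  | succ r ih =>
    intro k j
    rw [PySem.List.pyRange_one_cons (by omega)]
    simp only [List.foldl_cons, searchStep, okB]
    cases hs : PySem.List.pyGet? s k <;> cases ht : PySem.List.pyGet? t j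
    · simp [foldl_searchStep_false]
    · simp [foldl_searchStep_false]
    · simp [foldl_searchStep_false]
    · rename_i a b
      have hr : j + ((r + 1 : Nat) : Int) = (j + 1) + (r : Int) := by push_cast; ring
      rw [hr]
      by_cases hab : a = b
      · subst hab
        simp only [if_pos rfl, decide_true, Bool.true_and]
        exact ih (k - 1) (j + 1)
      · simp [hab, foldl_searchStep_false]

theorem okF_eq_isPrefixOf (s t : List Char) :
    ∀ (u : List Char) (off j : Nat), s.drop off = u →
      okF s t (off : Int) (j : Int) u.length = u.isPrefixOf (t.drop j) := by
  intro u
  induction u with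
  | nil => intro off j _; simp [okF, List.isPrefixOf]
  | cons a u ih =>
    intro off j h
    have hoff : off < s.length := by
      by_contra hc
      rw [List.drop_eq_nil_of_le (by omega)] at h
      simp at h
    have hsoff : s[off]? = some a := by
      have h0 : (s.drop off)[0]? = s[off]? := by
        rw [List.getElem?_drop]
        norm_num
      rw [h] at h0
      simpa using h0.symm
    simp only [List.length_cons, okF, PySem.List.pyGet?_natCast, hsoff]
    cases ht : t[j]? with
    | none =>
      have hj : t.length ≤ j := by
        by_contra hc
        rw [List.getElem?_eq_getElem (by omega)] at ht
        simp at ht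
      rw [List.drop_eq_nil_of_le (by omega)]
      simp [List.isPrefixOf]
    | some b =>
      have hj : j < t.length := by
        by_contra hc
        rw [List.getElem?_eq_none (by omega)] at ht
        simp at ht
      have hdrop : t.drop j = b :: t.drop (j + 1) := by
        rw [← List.getElem_cons_drop hj]
        rw [List.getElem?_eq_getElem hj] at ht
        simp only [Option.some.injEq] at ht
        rw [ht]
      have hrec : s.drop (off + 1) = u := by
        have h2 := congrArg (List.drop 1) h
        rw [List.drop_drop] at h2
        simpa using h2
      have := ih (off + 1) (j + 1) hrec
      push_cast at this ⊢
      rw [this, hdrop]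
      by_cases hab : a = b <;> simp [List.isPrefixOf, hab]

theorem okB_eq_isPrefixOf (s t : List Char) :
    ∀ (r j : Nat), r ≤ s.length →
      okB s t ((r : Int) - 1) (j : Int) r = ((s.take r).reverse).isPrefixOf (t.drop j) := by
  intro r
  induction r with
  | zero => intro j _; simp [okB, List.isPrefixOf]
  | succ r ih =>
    intro j hr
    have hsr : s[r]? = some s[r] := List.getElem?_eq_getElem (by omega)
    have hk : ((r + 1 : Nat) : Int) - 1 = ((r : Nat) : Int) := by push_cast; ring
    have htake : (s.take (r + 1)).reverse = s[r] :: (s.take r).reverse := by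
      rw [List.take_add_one, List.reverse_append]
      rw [List.getElem?_eq_getElem (by omega)]
      rfl
    rw [hk, htake]
    simp only [okB, PySem.List.pyGet?_natCast, hsr]
    cases ht : t[j]? with
    | none =>
      have hj : t.length ≤ j := by
        by_contra hc
        rw [List.getElem?_eq_getElem (by omega)] at ht
        simp at ht
      rw [List.drop_eq_nil_of_le (by omega)]
      simp [List.isPrefixOf]
    | some b =>
      have hj : j < t.length := by
        by_contra hc
        rw [List.getElem?_eq_none (by omega)] at ht
        simp at ht
      have hdrop : t.drop j = b :: t.drop (j + 1) := by
        rw [← List.getElem_cons_drop hj]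
        rw [List.getElem?_eq_getElem hj] at ht
        simp only [Option.some.injEq] at ht
        rw [ht]
      have := ih (j + 1) (by omega)
      push_cast at this ⊢
      rw [hdrop]
      by_cases hab : s[r] = b <;> simp [List.isPrefixOf, hab, this]

-- A computes the flatMap of per-index hits
theorem search_eq_flatMap (text subtext : String) (hne : subtext.toList ≠ []) :
    search text subtext = (List.range text.toList.length).flatMap (hits text.toList subtext.toList) := by
  obtain ⟨c, s', hcs⟩ : ∃ c s', subtext.toList = c :: s' := by
    cases h : subtext.toList with
    | nil => exact absurd h hne
    | cons c s' => exact ⟨c, s', rfl⟩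
  unfold search
  dsimp only
  rw [PySem.List.foldl_congr_mem (g := fun ltr i => ltr ++ hits text.toList subtext.toList i)]
  · rw [PySem.List.foldl_append_eq_flatMap]
    simp
  · intro ltr i hi
    rw [List.mem_range] at hi
    set t := text.toList with ht'
    set s := subtext.toList with hs'
    have hfold1 : ((PySem.List.pyRange (i : Int) ((i : Int) + (s.length : Int)) 1).foldl
        (searchStep s t 1) (0, true)).2 = s.isPrefixOf (t.drop i) := by
      rw [foldl_searchStep_eq_okF s t s.length 0 (i : Int)]
      have := okF_eq_isPrefixOf s t s 0 i (by simp)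
      simpa using this
    have hfold2 : ((PySem.List.pyRange (i : Int) ((i : Int) + (s.length : Int)) 1).foldl
        (searchStep s t (-1)) ((s.length : Int) - 1, true)).2 = s.reverse.isPrefixOf (t.drop i) := by
      rw [foldl_searchStep_eq_okB s t s.length ((s.length : Int) - 1) (i : Int)]
      have := okB_eq_isPrefixOf s t s.length i (le_refl _)
      rw [List.take_length] at this
      exact this
    have hgetD : ∀ (c0 : Char) (w : List Char), t.drop i = c0 :: w → t.getD i ' ' = c0 := by
      intro c0 w hw
      have h0 : (t.drop i)[0]? = t[i]? := by rw [List.getElem?_drop]; norm_num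
      rw [hw] at h0
      rw [List.getD_eq_getElem?_getD, ← h0]
      rfl
    have hguardF : s.isPrefixOf (t.drop i) = true → t.getD i ' ' = s.headD ' ' := by
      intro hf
      rw [List.isPrefixOf_iff_prefix] at hf
      obtain ⟨w, hw⟩ := hf
      rw [hcs] at hw ⊢
      simp only [List.headD_cons]
      exact hgetD c (s' ++ w) (by rw [← hw]; simp)
    have hguardB : s.reverse.isPrefixOf (t.drop i) = true → t.getD i ' ' = s.getLastD ' ' := by
      intro hf
      rw [List.isPrefixOf_iff_prefix] at hf
      obtain ⟨w, hw⟩ := hf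
      obtain ⟨c0, w0, hrev⟩ : ∃ c0 w0, s.reverse = c0 :: w0 := by
        cases h : s.reverse with
        | nil => rw [List.reverse_eq_nil_iff] at h; exact absurd h (by rw [hcs]; simp)
        | cons c0 w0 => exact ⟨c0, w0, rfl⟩
      have h1 : t.getD i ' ' = c0 := by
        apply hgetD c0 (w0 ++ w)
        rw [← hw, hrev]
        simp
      have h2 : s.getLastD ' ' = c0 := by
        rw [List.getLastD_eq_getLast?, List.getLast?_eq_head?_reverse, hrev]
        rfl
      rw [h1, h2]
    rw [hfold1, hfold2]
    unfold hits
    cases hf : s.isPrefixOf (t.drop i) <;> cases hb : s.reverse.isPrefixOf (t.drop i)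
    · simp
    · rw [hguardB hb]
      simp
    · rw [hguardF hf]
      simp
    · have hg : s.headD ' ' = s.getLastD ' ' := (hguardF hf).symm.trans (hguardB hb)
      have hg' : s.head?.getD ' ' = s.getLast?.getD ' ' := by simpa using hg
      rw [hguardF hf]
      simp [hg']

theorem findFromGo_none (t p : List Char) :
    ∀ (fuel st : Nat), t.length + 1 - st ≤ fuel → findFromGo t p fuel st = none →
      ∀ i, st ≤ i → i ≤ t.length → p.isPrefixOf (t.drop i) = false := by
  intro fuel
  induction fuel with
  | zero => intro st hf _ i h1 h2; omega
  | succ fuel ih =>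
    intro st hf h i h1 h2
    simp only [findFromGo] at h
    by_cases hst : st ≤ t.length
    · rw [if_pos hst] at h
      by_cases hp : p.isPrefixOf (t.drop st) = true
      · rw [if_pos hp] at h; simp at h
      · rw [if_neg hp] at h
        rcases Nat.eq_or_lt_of_le h1 with rfl | hlt
        · exact Bool.eq_false_iff.mpr hp
        · exact ih (st + 1) (by omega) h i (by omega) h2
    · omega

theorem findFromGo_some (t p : List Char) :
    ∀ (fuel st j : Nat), t.length + 1 - st ≤ fuel → findFromGo t p fuel st = some j →
      st ≤ j ∧ j ≤ t.length ∧ p.isPrefixOf (t.drop j) = true ∧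
        ∀ i, st ≤ i → i < j → p.isPrefixOf (t.drop i) = false := by
  intro fuel
  induction fuel with
  | zero => intro st j hf h; simp [findFromGo] at h
  | succ fuel ih =>
    intro st j hf h
    simp only [findFromGo] at h
    by_cases hst : st ≤ t.length
    · rw [if_pos hst] at h
      by_cases hp : p.isPrefixOf (t.drop st) = true
      · rw [if_pos hp] at h
        simp only [Option.some.injEq] at h
        subst h
        exact ⟨le_refl _, hst, hp, fun i h1 h2 => by omega⟩
      · rw [if_neg hp] at h
        obtain ⟨a1, a2, a3, a4⟩ := ih (st + 1) j (by omega) h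
        refine ⟨by omega, a2, a3, fun i h1 h2 => ?_⟩
        rcases Nat.eq_or_lt_of_le h1 with rfl | hlt
        · exact Bool.eq_false_iff.mpr hp
        · exact a4 i (by omega) h2
    · rw [if_neg hst] at h; simp at h

theorem occGo_eq (t p : List Char) :
    ∀ (fuel st : Nat), t.length + 1 - st ≤ fuel →
      occGo t p fuel st =
        ((List.range' st (t.length + 1 - st)).filter
          (fun j => p.isPrefixOf (t.drop j))).map (fun (j : Nat) => (j : Int)) := by
  intro fuel
  induction fuel with
  | zero =>
    intro st hf
    rw [show t.length + 1 - st = 0 by omega]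
    simp [occGo]
  | succ fuel ih =>
    intro st hf
    simp only [occGo]
    cases h : findFrom t p st with
    | none =>
      dsimp only
      have hnil : (List.range' st (t.length + 1 - st)).filter
          (fun j => p.isPrefixOf (t.drop j)) = [] := by
        rw [List.filter_eq_nil_iff]
        intro a ha
        rw [List.mem_range'_1] at ha
        simp only [Bool.not_eq_true]
        exact findFromGo_none t p _ st (le_refl _) h a ha.1 (by omega)
      rw [hnil, List.map_nil]
    | some j =>
      dsimp only
      obtain ⟨h1, h2, hj, hmin⟩ := findFromGo_some t p _ st j (le_refl _) h
      have hsplit : List.range' st (t.length + 1 - st)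
          = List.range' st (j - st) ++ List.range' j (t.length + 1 - j) := by
        have h3 : List.range' st (j - st) ++ List.range' (st + (j - st)) (t.length + 1 - j)
            = List.range' st ((j - st) + (t.length + 1 - j)) := List.range'_append_1
        rw [show st + (j - st) = j by omega,
          show (j - st) + (t.length + 1 - j) = t.length + 1 - st by omega] at h3
        exact h3.symm
      rw [hsplit, List.filter_append]
      rw [List.filter_eq_nil_iff.mpr (by
        intro a ha
        rw [List.mem_range'_1] at ha
        simp only [Bool.not_eq_true]
        exact hmin a ha.1 (by omega))]
      rw [List.nil_append, show t.length + 1 - j = (t.length - j) + 1 by omega, List.range'_succ,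
        List.filter_cons, if_pos hj, List.map_cons,
        show t.length - j = t.length + 1 - (j + 1) by omega, ih (j + 1) (by omega)]

-- occAux start = the matching positions ≥ start
theorem occAux_eq_filter (t p : List Char) (start : Nat) :
    occAux t p start =
      ((List.range' start (t.length + 1 - start)).filter
        (fun j => p.isPrefixOf (t.drop j))).map (fun (j : Nat) => (j : Int)) :=
  occGo_eq t p _ start (le_refl _)

theorem mergeGo_fuel :
    ∀ (f1 : Nat) (xs ys : List Int) (f2 : Nat), xs.length + ys.length ≤ f1 →
      xs.length + ys.length ≤ f2 → mergeGo f1 xs ys = mergeGo f2 xs ys := by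
  intro f1
  induction f1 with
  | zero =>
    intro xs ys f2 h1 h2
    have hx : xs = [] := List.eq_nil_of_length_eq_zero (by omega)
    have hy : ys = [] := List.eq_nil_of_length_eq_zero (by omega)
    subst hx; subst hy
    cases f2 <;> simp [mergeGo]
  | succ f1 ih =>
    intro xs ys f2 h1 h2
    cases f2 with
    | zero =>
      have hx : xs = [] := List.eq_nil_of_length_eq_zero (by omega)
      have hy : ys = [] := List.eq_nil_of_length_eq_zero (by omega)
      subst hx; subst hy
      simp [mergeGo]
    | succ f2 =>
      cases xs with
      | nil => simp [mergeGo]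
      | cons x xs =>
        cases ys with
        | nil => simp [mergeGo]
        | cons y ys =>
          simp only [mergeGo]
          by_cases hxy : x ≤ y
          · rw [if_pos hxy, if_pos hxy,
              ih xs (y :: ys) f2 (by simp at h1 ⊢; omega) (by simp at h2 ⊢; omega)]
          · rw [if_neg hxy, if_neg hxy,
              ih (x :: xs) ys f2 (by simp at h1 ⊢; omega) (by simp at h2 ⊢; omega)]

theorem mergeInt_nil_left (ys : List Int) : mergeInt [] ys = ys := by
  cases ys <;> simp [mergeInt, mergeGo]

theorem mergeInt_nil_right (xs : List Int) : mergeInt xs [] = xs := by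
  cases xs <;> simp [mergeInt, mergeGo]

theorem mergeInt_cons_cons (x y : Int) (xs ys : List Int) :
    mergeInt (x :: xs) (y :: ys)
      = if x ≤ y then x :: mergeInt xs (y :: ys) else y :: mergeInt (x :: xs) ys := by
  have hstep : mergeInt (x :: xs) (y :: ys)
      = if x ≤ y then x :: mergeGo (xs.length + ys.length + 1) xs (y :: ys)
        else y :: mergeGo (xs.length + ys.length + 1) (x :: xs) ys := by
    rw [mergeInt, show (x :: xs).length + (y :: ys).length = (xs.length + ys.length + 1) + 1 by
      simp only [List.length_cons]; omega]
    rfl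
  rw [hstep]
  by_cases hxy : x ≤ y
  · rw [if_pos hxy, if_pos hxy]
    first
      | rfl
      | (congr 1; first | rfl | rw [mergeInt])
  · rw [if_neg hxy, if_neg hxy]
    congr 1
    rw [mergeInt]
    apply mergeGo_fuel <;> · simp only [List.length_cons]; omega

theorem mergeInt_cons_lt_left (a : Int) (xs ys : List Int) (h : ∀ y ∈ ys, a < y) :
    mergeInt (a :: xs) ys = a :: mergeInt xs ys := by
  cases ys with
  | nil => rw [mergeInt_nil_right, mergeInt_nil_right]
  | cons y ys =>
    have : a ≤ y := le_of_lt (h y (by simp))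
    rw [mergeInt_cons_cons, if_pos this]

theorem mergeInt_cons_gt (a : Int) (ys : List Int) :
    ∀ xs : List Int, (∀ x ∈ xs, a < x) → mergeInt xs (a :: ys) = a :: mergeInt xs ys := by
  intro xs h
  cases xs with
  | nil => rw [mergeInt_nil_left, mergeInt_nil_left]
  | cons x xs =>
    have : ¬ x ≤ a := by have := h x (by simp); omega
    rw [mergeInt_cons_cons, if_neg this]

theorem mergeInt_filter (P Q : Nat → Bool) :
    ∀ l : List Nat, l.Pairwise (· < ·) →
      mergeInt ((l.filter P).map (fun (j : Nat) => (j : Int))) ((l.filter Q).map (fun (j : Nat) => (j : Int)))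
        = l.flatMap (fun i =>
            (if P i then [(i : Int)] else []) ++ (if Q i then [(i : Int)] else [])) := by
  intro l
  induction l with
  | nil => intro _; simp [mergeInt_nil_left]
  | cons a l ih =>
    intro hp
    rw [List.pairwise_cons] at hp
    obtain ⟨ha, hl⟩ := hp
    have hPmap : ∀ x ∈ ((l.filter P).map (fun (j : Nat) => (j : Int))), (a : Int) < x := by
      intro x hx
      rw [List.mem_map] at hx
      obtain ⟨b, hb, rfl⟩ := hx
      exact_mod_cast ha b (List.mem_of_mem_filter hb)
    have hQmap : ∀ x ∈ ((l.filter Q).map (fun (j : Nat) => (j : Int))), (a : Int) < x := by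
      intro x hx
      rw [List.mem_map] at hx
      obtain ⟨b, hb, rfl⟩ := hx
      exact_mod_cast ha b (List.mem_of_mem_filter hb)
    rw [List.flatMap_cons, ← ih hl]
    by_cases hP : P a = true <;> by_cases hQ : Q a = true
    · rw [List.filter_cons_of_pos hP, List.filter_cons_of_pos hQ, List.map_cons, List.map_cons]
      rw [show mergeInt ((a : Int) :: (l.filter P).map (fun (j : Nat) => (j : Int)))
            ((a : Int) :: (l.filter Q).map (fun (j : Nat) => (j : Int)))
          = (a : Int) :: mergeInt ((l.filter P).map (fun (j : Nat) => (j : Int)))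
            ((a : Int) :: (l.filter Q).map (fun (j : Nat) => (j : Int))) from by
              rw [mergeInt_cons_cons, if_pos (le_refl _)]]
      rw [mergeInt_cons_gt _ _ _ hPmap]
      simp [hP, hQ]
    · rw [List.filter_cons_of_pos hP, List.filter_cons_of_neg hQ, List.map_cons]
      rw [mergeInt_cons_lt_left _ _ _ hQmap]
      simp [hP, hQ]
    · rw [List.filter_cons_of_neg hP, List.filter_cons_of_pos hQ, List.map_cons]
      rw [mergeInt_cons_gt _ _ _ hPmap]
      simp [hP, hQ]
    · rw [List.filter_cons_of_neg hP, List.filter_cons_of_neg hQ]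
      simp [hP, hQ]

-- ===== VERDICT (by name: the statement is the Claim_ definition above) =====
theorem search_spec : Claim_equal_search := by
  intro text subtext _ hpre
  unfold Spec_search
  have hne : subtext.toList ≠ [] := hpre
  have hrevne : subtext.toList.reverse ≠ [] := by
    simpa using hne
  rw [search_eq_flatMap text subtext hne]
  unfold search_alt
  dsimp only
  rw [occAux_eq_filter, occAux_eq_filter]
  have h0 : ∀ n : Nat, n + 1 - 0 = n + 1 := fun n => rfl
  rw [h0, ← List.range_eq_range']
  rw [mergeInt_filter _ _ _ List.pairwise_lt_range]
  unfold hits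
  rw [List.range_succ, List.flatMap_append]
  have hlast : (List.flatMap (fun i =>
      (if subtext.toList.isPrefixOf (text.toList.drop i) then [(i : Int)] else []) ++
      (if subtext.toList.reverse.isPrefixOf (text.toList.drop i) then [(i : Int)] else []))
      [text.toList.length]) = [] := by
    simp only [List.flatMap_cons, List.flatMap_nil, List.drop_length, List.append_nil]
    obtain ⟨c, s', hcs⟩ : ∃ c s', subtext.toList = c :: s' := by
      cases h : subtext.toList with
      | nil => exact absurd h hne
      | cons c s' => exact ⟨c, s', rfl⟩
    rw [hcs]
    simp [List.isPrefixOf_iff_prefix]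
  rw [hlast, List.append_nil]
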